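-- pv_equiv track=rewrite | github.com/mortennp/mooc | UCSD_Bioinformatics/BioinformaticsSpyder/BioinformaticsI/SequencingAntibiotics/spectral_convolution_problem_2g.py | convolute
-- ===== SOURCE A (Python) =====
-- def convolute(spectrum):
--     diffs = []
--     for i in range(len(spectrum)):
--         for j in range(i):
--             diff = spectrum[i] - spectrum[j]
--             if diff > 0:
--                 diffs.append(diff)
--     return sorted(diffs)
-- ===== SOURCE B (Python) =====
-- def convolute(spectrum):
--     counts = {}
--     for i, x in enumerate(spectrum):
--         for y in spectrum[:i]:
--             d = x - y
--             if d > 0: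
--                 counts[d] = counts.get(d, 0) + 1
--     out = []
--     for d in sorted(counts):
--         out.extend([d] * counts[d])
--     return out
-- ===== Notes on version B (the rewrite author's own statement) =====
-- stated objective: faster
-- what changed: B tallies each positive pairwise difference into a dict (value -> multiplicity) and then emits the distinct values in sorted order, each repeated by its count, instead of collecting all Theta(n^2) differences into a list and comparison-sorting them; only the k distinct values are sorted.
import Mathlib
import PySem

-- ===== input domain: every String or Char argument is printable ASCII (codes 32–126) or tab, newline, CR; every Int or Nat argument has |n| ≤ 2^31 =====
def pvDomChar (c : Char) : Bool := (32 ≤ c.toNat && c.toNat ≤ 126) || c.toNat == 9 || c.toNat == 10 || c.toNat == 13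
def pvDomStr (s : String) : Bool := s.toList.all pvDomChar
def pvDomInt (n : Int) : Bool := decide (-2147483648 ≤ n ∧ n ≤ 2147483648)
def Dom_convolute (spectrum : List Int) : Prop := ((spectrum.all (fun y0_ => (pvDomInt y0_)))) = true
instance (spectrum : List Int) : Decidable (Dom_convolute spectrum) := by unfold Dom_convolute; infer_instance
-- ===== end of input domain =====

-- B tallies each positive pairwise difference into a dict (value → multiplicity) and emits the
-- distinct values in sorted order, each repeated by its count, instead of comparison-sorting the
-- full list of Θ(n²) differences, so only the distinct values are sorted (objective: faster).

-- ===== PORT A =====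
-- the `diffs` list A accumulates in its nested loops
def convolute_diffs (spectrum : List Int) : List Int :=
  (PySem.List.pyRange 0 (PySem.List.len spectrum)).foldl (fun diffs i =>
    (PySem.List.pyRange 0 i).foldl (fun diffs j =>
      if PySem.List.pyGetD spectrum i 0 - PySem.List.pyGetD spectrum j 0 > 0 then
        diffs ++ [PySem.List.pyGetD spectrum i 0 - PySem.List.pyGetD spectrum j 0]
      else diffs) diffs) []

def convolute (spectrum : List Int) : List Int :=
  PySem.List.sorted (convolute_diffs spectrum) (fun x => x)

-- ===== PORT B =====
-- the `counts` dict B builds in its nested loops (difference value → multiplicity)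
def convolute_alt_counts (spectrum : List Int) : PySem.Dict Int Int :=
  (PySem.List.enumerate spectrum).foldl (fun counts p =>
    (PySem.List.slice spectrum none (some p.1)).foldl (fun counts y =>
      if p.2 - y > 0 then counts.insert (p.2 - y) (counts.getD (p.2 - y) 0 + 1) else counts)
      counts) PySem.Dict.empty

def convolute_alt (spectrum : List Int) : List Int :=
  let counts := convolute_alt_counts spectrum
  (PySem.List.sorted counts.keys (fun x => x)).foldl (fun out d =>
    out ++ List.replicate (counts.getD d 0).toNat d) []

-- ===== PRECONDITION & SPEC =====
def Spec_convolute (spectrum : List Int) (out : List Int) : Prop := out = convolute_alt spectrum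
instance (spectrum : List Int) (out : List Int) : Decidable (Spec_convolute spectrum out) := by unfold Spec_convolute; infer_instance

-- ===== CLAIM (what is proved, stated in full; the proofs are below) =====
def Claim_equal_convolute : Prop := ∀ (spectrum : List Int), Dom_convolute spectrum → Spec_convolute spectrum (convolute spectrum)

-- ===== LEMMAS AND PROOFS =====

-- the flat list of positive differences, in A's generation order
def pvDiffs (xs : List Int) : List Int :=
  (List.range xs.length).flatMap (fun i =>
    ((List.range i).filter (fun j => decide (0 < xs.getD i 0 - xs.getD j 0))).map
      (fun j => xs.getD i 0 - xs.getD j 0))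

-- prefix of a list as a map over range
lemma take_eq_map_range (xs : List Int) (i : Nat) (h : i ≤ xs.length) :
    xs.take i = (List.range i).map (fun j => xs.getD j 0) := by
  apply List.ext_getElem
  · simp [Nat.min_eq_left h]
  · intro n h1 h2
    simp only [List.getElem_take, List.getElem_map, List.getElem_range]
    rw [List.getD_eq_getElem xs 0 (by simp at h1; omega)]

-- A's nested loop produces pvDiffs
lemma diffs_eq_pvDiffs (xs : List Int) : convolute_diffs xs = pvDiffs xs := by
  unfold convolute_diffs
  have hlen : PySem.List.len xs = (xs.length : Int) := by simp [PySem.List.len]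
  rw [hlen, PySem.List.pyRange_zero_natCast, List.foldl_map]
  have hinner : ∀ (i : Nat) (acc : List Int),
      (PySem.List.pyRange 0 ((i : Nat) : Int)).foldl (fun diffs j =>
        if PySem.List.pyGetD xs ((i : Nat) : Int) 0 - PySem.List.pyGetD xs j 0 > 0 then
          diffs ++ [PySem.List.pyGetD xs ((i : Nat) : Int) 0 - PySem.List.pyGetD xs j 0]
        else diffs) acc
      = acc ++ ((List.range i).filter (fun j => decide (0 < xs.getD i 0 - xs.getD j 0))).map
          (fun j => xs.getD i 0 - xs.getD j 0) := by
    intro i acc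
    rw [PySem.List.pyRange_zero_natCast, List.foldl_map]
    simpa [PySem.List.pyGetD_natCast] using
      PySem.List.foldl_append_if
        (fun j => decide (0 < xs.getD i 0 - xs.getD j 0))
        (fun j => xs.getD i 0 - xs.getD j 0) (List.range i) acc
  rw [PySem.List.foldl_congr_mem _ _
      (fun acc i => acc ++ ((List.range i).filter
          (fun j => decide (0 < xs.getD i 0 - xs.getD j 0))).map
          (fun j => xs.getD i 0 - xs.getD j 0)) _
      (fun acc i _ => hinner i acc)]
  rw [PySem.List.foldl_append_eq_flatMap]
  rfl

-- a nested loop of dict increments = one loop of increments over the concatenation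
lemma foldl_inc_flatMap (l : List Nat) (f : Nat → List Int) (d : PySem.Dict Int Int) :
    l.foldl (fun d i => (f i).foldl (fun d x => d.insert x (d.getD x 0 + 1)) d) d
      = (l.flatMap f).foldl (fun d x => d.insert x (d.getD x 0 + 1)) d := by
  induction l generalizing d with
  | nil => rfl
  | cons h t ih => simp [List.flatMap_cons, List.foldl_append, ih]

-- B's counting loop builds Counter(pvDiffs xs)
lemma counts_eq_counter (xs : List Int) :
    convolute_alt_counts xs = PySem.Dict.counter (pvDiffs xs) := by
  unfold convolute_alt_counts
  have hlen : PySem.List.len xs = (xs.length : Int) := by simp [PySem.List.len]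
  rw [PySem.List.enumerate_eq_map_pyRange xs 0, hlen, PySem.List.pyRange_zero_natCast,
    List.foldl_map, List.foldl_map]
  have hinner : ∀ (i : Nat), i < xs.length → ∀ (c : PySem.Dict Int Int),
      (PySem.List.slice xs none (some ((i : Nat) : Int))).foldl (fun c y =>
        if PySem.List.pyGetD xs ((i : Nat) : Int) 0 - y > 0 then
          c.insert (PySem.List.pyGetD xs ((i : Nat) : Int) 0 - y)
            (c.getD (PySem.List.pyGetD xs ((i : Nat) : Int) 0 - y) 0 + 1)
        else c) c
      = (((List.range i).filter (fun j => decide (0 < xs.getD i 0 - xs.getD j 0))).map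
          (fun j => xs.getD i 0 - xs.getD j 0)).foldl
          (fun d x => d.insert x (d.getD x 0 + 1)) c := by
    intro i hi c
    rw [PySem.List.slice_to_natCast, take_eq_map_range xs i (le_of_lt hi),
      List.foldl_map, List.foldl_map, List.foldl_filter]
    simp [PySem.List.pyGetD_natCast]
  rw [PySem.List.foldl_congr_mem _ _
      (fun c i => (((List.range i).filter
          (fun j => decide (0 < xs.getD i 0 - xs.getD j 0))).map
          (fun j => xs.getD i 0 - xs.getD j 0)).foldl
          (fun d x => d.insert x (d.getD x 0 + 1)) c) _
      (fun c i hi => hinner i (List.mem_range.mp hi) c)]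
  rw [foldl_inc_flatMap]
  exact PySem.Dict.foldl_insert_getD_add_one_eq_counter (pvDiffs xs)

-- count of x in the expansion of a nodup key list
lemma count_flat_replicate (keys ds : List Int) (hnd : keys.Nodup) (x : Int) :
    (keys.flatMap (fun k => List.replicate (ds.count k) k)).count x
      = if x ∈ keys then ds.count x else 0 := by
  induction keys with
  | nil => simp
  | cons k t ih =>
    rw [List.nodup_cons] at hnd
    obtain ⟨hk, hnd⟩ := hnd
    rw [List.flatMap_cons, List.count_append, ih hnd, List.count_replicate]
    by_cases hxk : x = k
    · subst hxk
      simp [hk]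
    · simp [hxk, Ne.symm hxk]

-- the expansion is a permutation of ds
lemma flat_replicate_perm (keys ds : List Int) (hnd : keys.Nodup)
    (hmem : ∀ x, x ∈ keys ↔ x ∈ ds) :
    (keys.flatMap (fun k => List.replicate (ds.count k) k)).Perm ds := by
  rw [List.perm_iff_count]
  intro a
  rw [count_flat_replicate keys ds hnd a]
  by_cases h : a ∈ keys
  · simp [h]
  · simp [h, List.count_eq_zero.mpr (fun hc => h ((hmem a).mpr hc))]

-- expanding a strictly increasing key list gives a ≤-sorted list
lemma flat_replicate_pairwise (keys : List Int) (n : Int → Nat)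
    (h : keys.Pairwise (· < ·)) :
    (keys.flatMap (fun k => List.replicate (n k) k)).Pairwise (· ≤ ·) := by
  induction keys with
  | nil => simp
  | cons k t ih =>
    rw [List.pairwise_cons] at h
    obtain ⟨hk, ht⟩ := h
    rw [List.flatMap_cons, List.pairwise_append]
    refine ⟨List.pairwise_replicate.mpr (Or.inr le_rfl), ih ht, ?_⟩
    intro a ha b hb
    rw [List.eq_of_mem_replicate ha]
    rcases List.mem_flatMap.mp hb with ⟨k', hk', hb'⟩
    rw [List.eq_of_mem_replicate hb']
    exact le_of_lt (hk k' hk')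

-- ===== VERDICT (by name: the statement is the Claim_ definition above) =====
theorem convolute_spec : Claim_equal_convolute := by
  intro xs _
  unfold Spec_convolute convolute convolute_alt
  rw [diffs_eq_pvDiffs, counts_eq_counter]
  rw [PySem.List.foldl_append_eq_flatMap, List.nil_append]
  have hfun : (fun d => List.replicate ((PySem.Dict.counter (pvDiffs xs)).getD d 0).toNat d)
      = (fun d => List.replicate ((pvDiffs xs).count d) d) := by
    funext d
    rw [PySem.Dict.getD_counter]
    simp
  rw [hfun, PySem.Dict.keys_counter]
  apply PySem.List.sorted_id_eq_of_perm_of_pairwise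
  · apply flat_replicate_perm
    · exact (PySem.List.sorted_perm _ _ _).symm.nodup (PySem.Set.nodup_ofList _)
    · intro x
      rw [PySem.List.mem_sorted, PySem.Set.mem_ofList]
  · exact flat_replicate_pairwise _ _ (PySem.List.sorted_ofList_pairwise_lt _)
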